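-- pv_equiv track=rewrite | github.com/idrecun/kripto-materijali | old_priprema/resenja/1/poly.py | poly_str
-- ===== SOURCE A (Python) =====
-- def mono_str(n):
--     if n == 0:
--         return '1'
--     if n == 1:
--         return 'x'
--     return 'x^' + str(n)
--
-- def poly_str(p):
--     monomials = []
--     power = 0
--     while p:
--         if p & 1:
--             monomials.append(power)
--         p >>= 1
--         power += 1
--     monomials.reverse()
--     return ' + '.join(mono_str(m) for m in monomials)
-- ===== SOURCE B (Python) =====
-- def mono_str(n):
--     if n == 0:
--         return '1'
--     if n == 1:
--         return 'x'
--     return 'x^' + str(n)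
--
-- def poly_str(p):
--     # MSB-first recursion: peel off the highest set bit each step; no list, no reverse.
--     if p <= 0:
--         return ''
--     hi = p.bit_length() - 1
--     rest = poly_str(p - (1 << hi))
--     return mono_str(hi) if rest == '' else mono_str(hi) + ' + ' + rest
-- ===== Notes on version B (the rewrite author's own statement) =====
-- stated objective: alternative
-- what changed: Replaced A's low-to-high bit loop that accumulates a list of powers and then reverses it with a direct MSB-first recursion that peels off the highest set bit (via bit_length) and builds the string high-to-low, with no list and no reverse.
import Mathlib
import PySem

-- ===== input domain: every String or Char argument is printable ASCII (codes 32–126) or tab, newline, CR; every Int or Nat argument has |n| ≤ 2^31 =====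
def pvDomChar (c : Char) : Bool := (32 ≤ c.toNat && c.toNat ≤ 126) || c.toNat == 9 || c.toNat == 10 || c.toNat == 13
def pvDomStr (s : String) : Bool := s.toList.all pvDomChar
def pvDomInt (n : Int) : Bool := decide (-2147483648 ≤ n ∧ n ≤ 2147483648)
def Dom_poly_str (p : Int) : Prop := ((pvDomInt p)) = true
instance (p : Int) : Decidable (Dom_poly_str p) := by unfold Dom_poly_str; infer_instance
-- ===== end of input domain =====

-- B replaces A's low-to-high bit loop (list of powers, then reverse) by an MSB-first
-- recursion peeling off the highest set bit; alternative decomposition, same cost.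

-- ===== PORT A =====
def monoStr (n : Int) : String :=
  if n = 0 then "1" else if n = 1 then "x" else "x^" ++ PySem.Int.toStr n

-- the 'while p:' loop of A; fuel p.toNat+1 bounds the iteration count (bit length ≤ p)
def polyLoopA : Nat → Int → Int → List Int → List Int
  | 0, _, _, acc => acc
  | fuel+1, p, power, acc =>
      if p = 0 then acc
      else polyLoopA fuel (p >>> (1:Nat)) (power+1)
        (if PySem.Int.band p 1 ≠ 0 then acc ++ [power] else acc)

def poly_str (p : Int) : String :=
  PySem.Str.join " + " (((polyLoopA (p.toNat+1) p 0 []).reverse).map monoStr)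

-- ===== PORT B =====
def poly_str_alt (p : Int) : String :=
  if p ≤ 0 then ""
  else
    let hi : Nat := PySem.Int.bitLength p - 1
    let rest := poly_str_alt (p - (1:Int) <<< hi)
    if rest = "" then monoStr hi else monoStr hi ++ " + " ++ rest
termination_by p.toNat
decreasing_by
  rename_i h
  have _hp : 0 < p := by omega
  
  have h1 : 2 ^ (PySem.Int.bitLength p - 1) ≤ p.natAbs :=
    PySem.Int.two_pow_bitLength_le p (by omega)
  have h2 : 0 < 2 ^ (PySem.Int.bitLength p - 1) := Nat.pow_pos (by omega)
  have habs : p.natAbs = p.toNat := by omega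
  have : (1:Int) <<< (PySem.Int.bitLength p - 1) = ((2 ^ (PySem.Int.bitLength p - 1) : Nat) : Int) := by
    simp [Int.shiftLeft_eq]
  rw [this]
  omega

-- ===== PRECONDITION & SPEC =====
-- Pre_ excludes p < 0: there A's 'while p' never terminates (p >>= 1 converges to -1).
def Pre_poly_str (p : Int) : Prop := 0 ≤ p
instance (p : Int) : Decidable (Pre_poly_str p) := by unfold Pre_poly_str; infer_instance
def pvWitness_poly_str : Int := (13)
def Spec_poly_str (p : Int) (out : String) : Prop := out = poly_str_alt p
instance (p : Int) (out : String) : Decidable (Spec_poly_str p out) := by unfold Spec_poly_str; infer_instance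

-- ===== CLAIM (what is proved, stated in full; the proofs are below) =====
def Claim_equal_poly_str : Prop := ∀ (p : Int), Dom_poly_str p → Pre_poly_str p → Spec_poly_str p (poly_str p)

-- ===== LEMMAS AND PROOFS =====

-- ascending positions of the set bits of n
def bitsAsc (n : Nat) : List Nat :=
  if n = 0 then [] else (if n % 2 = 1 then [0] else []) ++ (bitsAsc (n/2)).map (·+1)
decreasing_by exact Nat.div_lt_self (by omega) (by omega)

theorem bitsAsc_zero : bitsAsc 0 = [] := by rw [bitsAsc]; simp

theorem bitsAsc_pos {n : Nat} (h : n ≠ 0) :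
    bitsAsc n = (if n % 2 = 1 then [0] else []) ++ (bitsAsc (n/2)).map (·+1) := by
  rw [bitsAsc]; simp [h]

theorem map_shift (l : List Nat) (power : Int) :
    List.map (fun k : Nat => power + ((k : Nat) : Int)) (l.map (·+1)) =
      List.map (fun k : Nat => (power+1) + ((k : Nat) : Int)) l := by
  rw [List.map_map]
  apply List.map_congr_left
  intro k _
  simp only [Function.comp]
  push_cast
  ring

theorem polyLoopA_spec (fuel : Nat) : ∀ (n : Nat) (power : Int) (acc : List Int), n < fuel →
    polyLoopA fuel (n : Int) power acc = acc ++ (bitsAsc n).map (fun k : Nat => power + (k : Int)) := by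
  induction fuel with
  | zero => intro n power acc h; omega
  | succ fuel ih =>
    intro n power acc h
    by_cases hn : n = 0
    · subst hn; simp [polyLoopA, bitsAsc_zero]
    · have hcast : ((n:Int) ≠ 0) := by exact_mod_cast hn
      have hshift : ((n:Int) >>> (1:Nat)) = ((n >>> 1 : Nat) : Int) := rfl
      have hdiv : n >>> 1 = n / 2 := Nat.shiftRight_one n
      rw [polyLoopA, if_neg hcast, hshift, hdiv,
        ih (n/2) (power+1) _ (by omega), bitsAsc_pos hn]
      have hband : PySem.Int.band (n:Int) 1 = ((n &&& 1 : Nat) : Int) :=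
        PySem.Int.band_natCast n 1
      rw [hband, Nat.and_one_is_mod, List.map_append, map_shift]
      by_cases hp : n % 2 = 1
      · simp [hp]
      · have h0 : n % 2 = 0 := by omega
        simp [h0]

theorem bitLength_eq_log2 : ∀ (m : Nat), 0 < m → PySem.Int.bitLength (m:Int) = Nat.log2 m + 1 := by
  intro m
  induction m using Nat.strong_induction_on with
  | _ m ih =>
    intro hm
    by_cases h2 : 2 ≤ m
    · have hl : m.log2 = (m/2).log2 + 1 := by rw [Nat.log2_def]; simp [h2]
      rw [PySem.Int.bitLength_natCast hm, ih (m/2) (by omega) (by omega)]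
      omega
    · have : m = 1 := by omega
      subst this; decide

-- peeling the highest set bit off bitsAsc
theorem bitsAsc_decomp : ∀ (n : Nat), 0 < n →
    bitsAsc n = bitsAsc (n - 2 ^ Nat.log2 n) ++ [Nat.log2 n] := by
  intro n
  induction n using Nat.strong_induction_on with
  | _ n ih =>
    intro hn
    by_cases h2 : 2 ≤ n
    · have hlog : Nat.log2 n = Nat.log2 (n/2) + 1 := by rw [Nat.log2_def]; simp [h2]
      have hpow : 2 ^ Nat.log2 n = 2 * 2 ^ Nat.log2 (n/2) := by rw [hlog]; ring
      have hle : 2 ^ Nat.log2 (n/2) ≤ n / 2 := Nat.log2_self_le (by omega)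
      set e := 2 ^ Nat.log2 (n/2) with he
      have hepos : 0 < e := Nat.pow_pos (by omega)
      have ihh := ih (n/2) (by omega) (by omega)
      set m := n - 2 ^ Nat.log2 n with hm
      have hmd : m / 2 = n / 2 - e := by omega
      have hmm : m % 2 = n % 2 := by omega
      rw [bitsAsc_pos (by omega), ihh, hmd.symm]
      by_cases hm0 : m = 0
      · have hd : m / 2 = 0 := by omega
        rw [hm0, Nat.zero_div, bitsAsc_zero]
        have hn2 : ¬ (n % 2 = 1) := by omega
        simp [hn2, hlog]
      · rw [bitsAsc_pos hm0, hmm]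
        by_cases hp : n % 2 = 1 <;> simp [hp, hlog]
    · have : n = 1 := by omega
      subst this
      have h0 : Nat.log2 1 = 0 := by rw [Nat.log2_def]; simp
      rw [bitsAsc_pos (by omega)]
      simp [h0, bitsAsc_zero]

-- join facts at the Chars level
theorem join_nil_str : PySem.Str.join " + " [] = "" := by
  apply String.ext
  rw [PySem.Str.toList_join]
  simp [PySem.Chars.join, List.intercalate]

theorem join_singleton_str (x : String) : PySem.Str.join " + " [x] = x := by
  apply String.ext
  rw [PySem.Str.toList_join]
  simp [PySem.Chars.join, List.intercalate]

theorem join_cons_cons_str (x y : String) (ys : List String) :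
    PySem.Str.join " + " (x :: y :: ys) = x ++ " + " ++ PySem.Str.join " + " (y :: ys) := by
  apply String.ext
  rw [PySem.Str.toList_join]
  simp [PySem.Chars.join, List.intercalate, PySem.Str.toList_join]

theorem monoStr_ne_empty (k : Int) : monoStr k ≠ "" := by
  unfold monoStr
  split_ifs with h1 h2
  · decide
  · decide
  · intro hc
    have := congrArg String.toList hc
    simp at this

theorem join_cons_ne_empty (x : String) (xs : List String) (hx : x ≠ "") :
    PySem.Str.join " + " (x :: xs) ≠ "" := by
  cases xs with
  | nil => rw [join_singleton_str]; exact hx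
  | cons y ys =>
    rw [join_cons_cons_str]
    intro hc
    have := congrArg String.toList hc
    simp at this

theorem poly_str_alt_spec : ∀ (p : Int),
    poly_str_alt p = PySem.Str.join " + " ((bitsAsc p.toNat).reverse.map (fun k : Nat => monoStr (k : Int))) := by
  intro p
  induction p using (WellFounded.induction (measure (Int.toNat)).wf) with
  | _ p ih =>
    by_cases hp : p ≤ 0
    · rw [poly_str_alt, if_pos hp]
      have : p.toNat = 0 := by omega
      rw [this, bitsAsc_zero, List.reverse_nil, List.map_nil, join_nil_str]
    · have hpos : 0 < p := by omega
      have hn : 0 < p.toNat := by omega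
      have hcast : p = ((p.toNat : Nat) : Int) := by omega
      have hbl : PySem.Int.bitLength p - 1 = Nat.log2 p.toNat := by
        conv_lhs => rw [hcast]
        rw [bitLength_eq_log2 p.toNat hn]
        omega
      set h := Nat.log2 p.toNat with hh
      have hle : 2 ^ h ≤ p.toNat := Nat.log2_self_le (by omega)
      have hshl : (1:Int) <<< (PySem.Int.bitLength p - 1) = ((2 ^ h : Nat) : Int) := by
        rw [hbl]; simp [Int.shiftLeft_eq]
      have hm : (p - (1:Int) <<< (PySem.Int.bitLength p - 1)).toNat = p.toNat - 2 ^ h := by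
        rw [hshl]; omega
      rw [poly_str_alt]
      simp only [if_neg hp]
      have ihh := ih (p - (1:Int) <<< (PySem.Int.bitLength p - 1)) (by
        show (p - (1:Int) <<< (PySem.Int.bitLength p - 1)).toNat < p.toNat
        have : 0 < 2 ^ h := Nat.pow_pos (by omega)
        omega)
      rw [ihh, hm, hbl]
      rw [bitsAsc_decomp p.toNat hn]
      simp only [List.reverse_append, List.reverse_cons, List.reverse_nil,
        List.nil_append, List.cons_append, List.map_cons]
      cases hc : (bitsAsc (p.toNat - 2 ^ h)).reverse.map (fun k : Nat => monoStr (k : Int)) with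
      | nil => rw [join_nil_str, if_pos rfl, join_singleton_str]
      | cons y ys =>
        have hy : y ≠ "" := by
          obtain ⟨b, bs, _, hyb, _⟩ := List.map_eq_cons_iff.mp hc
          rw [← hyb]
          exact monoStr_ne_empty _
        rw [if_neg (join_cons_ne_empty y ys hy), join_cons_cons_str]

-- ===== VERDICT (by name: the statement is the Claim_ definition above) =====
theorem poly_str_spec : Claim_equal_poly_str := by
  intro p _ hpre
  have hp0 : (0:Int) ≤ p := hpre
  unfold Spec_poly_str
  obtain ⟨n, rfl⟩ : ∃ n : Nat, p = (n : Int) := ⟨p.toNat, by omega⟩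
  rw [poly_str_alt_spec]
  unfold poly_str
  rw [Int.toNat_natCast, polyLoopA_spec (n + 1) n 0 [] (by omega)]
  simp [List.map_map, Function.comp_def, List.map_reverse]
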